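-- pv_equiv track=rewrite | github.com/rnag/dataclass-wizard | dataclass_wizard/utils/_string_conv.py | _outer_comma_and_pipe_indices
-- ===== SOURCE A (Python) =====
-- from typing import Iterable, Dict, List
--
-- OPEN_BRACKET = '['
--
-- CLOSE_BRACKET = ']'
--
-- COMMA = ','
--
-- OR = '|'
--
-- def _outer_comma_and_pipe_indices(s: str) -> Dict[str, List[int]]:
--     """Return any indices of ',' and '|' that are outside of braces."""
--     indices = {OR: [], COMMA: []}
--     brace_dict = {OPEN_BRACKET: 1, CLOSE_BRACKET: -1}
--     brace_count = 0
--
--     for i, char in enumerate(s):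
--         if char in brace_dict:
--             brace_count += brace_dict[char]
--         elif not brace_count and char in indices:
--             indices[char].append(i)
--
--     return indices
-- ===== SOURCE B (Python) =====
-- OPEN_BRACKET = '['
-- CLOSE_BRACKET = ']'
-- COMMA = ','
-- OR = '|'
--
-- def _outer_comma_and_pipe_indices(s):
--     """Two-pass: precompute a prefix bracket-depth table, then filter indices."""
--     depth = [0]
--     d = 0
--     for ch in s:
--         d += 1 if ch == OPEN_BRACKET else (-1 if ch == CLOSE_BRACKET else 0)
--         depth.append(d)
--     return {
--         OR: [i for i, ch in enumerate(s) if ch == OR and depth[i] == 0],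
--         COMMA: [i for i, ch in enumerate(s) if ch == COMMA and depth[i] == 0],
--     }
-- ===== Notes on version B (the rewrite author's own statement) =====
-- stated objective: alternative
-- what changed: B replaces A's single interleaved loop (bracket counting and index collection in one pass with mutable state) by two separate passes: first build a prefix bracket-depth table, then filter the character positions whose depth is zero into the two buckets.
import Mathlib
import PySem

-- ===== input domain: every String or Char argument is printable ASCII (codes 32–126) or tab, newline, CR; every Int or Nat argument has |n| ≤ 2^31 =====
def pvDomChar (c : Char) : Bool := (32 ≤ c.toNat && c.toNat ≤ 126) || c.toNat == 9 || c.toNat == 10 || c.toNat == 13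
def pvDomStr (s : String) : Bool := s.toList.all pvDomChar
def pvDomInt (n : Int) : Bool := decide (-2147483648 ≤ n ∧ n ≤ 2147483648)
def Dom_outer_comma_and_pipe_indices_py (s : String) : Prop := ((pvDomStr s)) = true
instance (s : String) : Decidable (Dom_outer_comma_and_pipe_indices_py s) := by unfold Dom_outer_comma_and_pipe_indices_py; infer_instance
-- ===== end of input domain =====

-- B builds a prefix bracket-depth table first and then filters positions with depth 0, instead of A's single interleaved counting/collecting loop (alternative decomposition, same cost).


-- ===== PORT A =====
-- A's loop: one pass, mutable brace_count, appending to the matching bucket.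
def pvALoop : List (Int × Char) → Int → List Int → List Int → List Int × List Int
  | [], _, ors, commas => (ors, commas)
  | (i, c) :: rest, b, ors, commas =>
    if c = '[' then pvALoop rest (b + 1) ors commas
    else if c = ']' then pvALoop rest (b - 1) ors commas
    else if b = 0 ∧ c = '|' then pvALoop rest b (ors ++ [i]) commas
    else if b = 0 ∧ c = ',' then pvALoop rest b ors (commas ++ [i])
    else pvALoop rest b ors commas

def outer_comma_and_pipe_indices_py (s : String) : List (String × List Int) :=
  let r := pvALoop (PySem.List.enumerate s.toList 0) 0 [] []
  [("|", r.1), (",", r.2)]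

-- ===== PORT B =====
-- B: pass 1 builds the prefix-depth table, pass 2 filters positions with depth 0.
def pvDepthStep (d : Int) (c : Char) : Int :=
  if c = '[' then d + 1 else if c = ']' then d - 1 else d

def pvPick (target : Char) (pcs : List ((Int × Char) × Int)) : List Int :=
  pcs.filterMap fun p => if p.1.2 = target ∧ p.2 = 0 then some p.1.1 else none

def outer_comma_and_pipe_indices_py_alt (s : String) : List (String × List Int) :=
  let cs := s.toList
  let depths := cs.scanl pvDepthStep 0
  let pcs := (PySem.List.enumerate cs 0).zip depths
  [("|", pvPick '|' pcs), (",", pvPick ',' pcs)]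

-- ===== PRECONDITION & SPEC =====
def Spec_outer_comma_and_pipe_indices_py (s : String) (out : List (String × List Int)) : Prop := out = outer_comma_and_pipe_indices_py_alt s
instance (s : String) (out : List (String × List Int)) : Decidable (Spec_outer_comma_and_pipe_indices_py s out) := by unfold Spec_outer_comma_and_pipe_indices_py; infer_instance

-- ===== CLAIM (what is proved, stated in full; the proofs are below) =====
def Claim_equal_outer_comma_and_pipe_indices_py : Prop := ∀ (s : String), Dom_outer_comma_and_pipe_indices_py s → Spec_outer_comma_and_pipe_indices_py s (outer_comma_and_pipe_indices_py s)

-- ===== LEMMAS AND PROOFS =====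

-- ===== VERDICT (by name: the statement is the Claim_ definition above) =====
lemma pvALoop_eq (cs : List Char) : ∀ (i b : Int) (ors commas : List Int),
    pvALoop (PySem.List.enumerate cs i) b ors commas =
      (ors ++ pvPick '|' ((PySem.List.enumerate cs i).zip (cs.scanl pvDepthStep b)),
       commas ++ pvPick ',' ((PySem.List.enumerate cs i).zip (cs.scanl pvDepthStep b))) := by
  induction cs with
  | nil => intro i b ors commas; simp [PySem.List.enumerate_nil, pvALoop, pvPick]
  | cons c rest ih =>
    intro i b ors commas
    rw [PySem.List.enumerate_cons, List.scanl_cons, List.zip_cons_cons]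
    by_cases h1 : c = '['
    · subst h1
      rw [show pvALoop ((i, '[') :: PySem.List.enumerate rest (i + 1)) b ors commas
            = pvALoop (PySem.List.enumerate rest (i + 1)) (b + 1) ors commas from by
          simp [pvALoop], ih]
      simp [pvPick, pvDepthStep]
    · by_cases h2 : c = ']'
      · subst h2
        rw [show pvALoop ((i, ']') :: PySem.List.enumerate rest (i + 1)) b ors commas
              = pvALoop (PySem.List.enumerate rest (i + 1)) (b - 1) ors commas from by
            simp [pvALoop], ih]
        simp [pvPick, pvDepthStep]
      · have hd : pvDepthStep b c = b := by simp [pvDepthStep, h1, h2]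
        rw [hd]
        by_cases hb : b = 0
        · subst hb
          by_cases h3 : c = '|'
          · subst h3
            rw [show pvALoop ((i, '|') :: PySem.List.enumerate rest (i + 1)) 0 ors commas
                  = pvALoop (PySem.List.enumerate rest (i + 1)) 0 (ors ++ [i]) commas from by
                simp [pvALoop], ih]
            simp [pvPick]
          · by_cases h4 : c = ','
            · subst h4
              rw [show pvALoop ((i, ',') :: PySem.List.enumerate rest (i + 1)) 0 ors commas
                    = pvALoop (PySem.List.enumerate rest (i + 1)) 0 ors (commas ++ [i]) from by
                  simp [pvALoop, h3], ih]
              simp [pvPick]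
            · rw [show pvALoop ((i, c) :: PySem.List.enumerate rest (i + 1)) 0 ors commas
                    = pvALoop (PySem.List.enumerate rest (i + 1)) 0 ors commas from by
                  simp [pvALoop, h1, h2, h3, h4], ih]
              simp [pvPick, h3, h4]
        · rw [show pvALoop ((i, c) :: PySem.List.enumerate rest (i + 1)) b ors commas
                = pvALoop (PySem.List.enumerate rest (i + 1)) b ors commas from by
              simp [pvALoop, h1, h2, hb], ih]
          simp [pvPick, hb]

theorem outer_comma_and_pipe_indices_py_spec : Claim_equal_outer_comma_and_pipe_indices_py := by
  intro s _
  unfold Spec_outer_comma_and_pipe_indices_py outer_comma_and_pipe_indices_py outer_comma_and_pipe_indices_py_alt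
  rw [pvALoop_eq]
  simp
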